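-- pv_equiv track=rewrite | github.com/seocringe/seocringe_bot | bot/develop/netscape.py | split_message_into_parts
-- ===== SOURCE A (Python) =====
-- def split_message_into_parts(text, max_part_len):
--     paragraphs = text.split('\n')
--     messages = []
--     current_message = ""
--     for paragraph in paragraphs:
--         if len(paragraph) > max_part_len:
--             words = paragraph.split(' ')
--             current_paragraph = ""
--             for word in words:
--                 if len(current_paragraph) + len(word) + 1 <= max_part_len:
--                     current_paragraph += word + ' '
--                 else:
--                     if len(current_message) + len(current_paragraph) <= max_part_len:
--                         current_message += current_paragraph + '\n'
--                     else:
--                         messages.append(current_message)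
--                         current_message = current_paragraph + '\n'
--                     current_paragraph = word + ' '
--             if current_paragraph:
--                 if len(current_message) + len(current_paragraph) <= max_part_len:
--                     current_message += current_paragraph + '\n'
--                 else:
--                     messages.append(current_message)
--                     current_message = current_paragraph + '\n'
--         else:
--             if len(current_message) + len(paragraph) + 1 <= max_part_len:
--                 current_message += paragraph + '\n'
--             else:
--                 messages.append(current_message)
--                 current_message = paragraph + '\n'
--     if current_message:
--         messages.append(current_message)
--     return messages
-- ===== SOURCE B (Python) =====
-- def split_message_into_parts(text, max_part_len):
--     # Phase 1: one pass producing flat (emit_string, threshold_cost) pieces.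
--     # A short paragraph costs len+1; an over-length paragraph is word-packed
--     # into segments (keeping their trailing space) costing len(segment).
--     pieces = []
--     for paragraph in text.split('\n'):
--         if len(paragraph) > max_part_len:
--             seg = ""
--             for word in paragraph.split(' '):
--                 if len(seg) + len(word) + 1 <= max_part_len:
--                     seg += word + ' '
--                 else:
--                     pieces.append((seg + '\n', len(seg)))
--                     seg = word + ' '
--             if seg:
--                 pieces.append((seg + '\n', len(seg)))
--         else:
--             pieces.append((paragraph + '\n', len(paragraph) + 1))
--     # Phase 2: greedily pack the pieces into messages.
--     messages = []
--     current = ""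
--     for s, cost in pieces:
--         if len(current) + cost <= max_part_len:
--             current += s
--         else:
--             messages.append(current)
--             current = s
--     if current:
--         messages.append(current)
--     return messages
-- ===== Notes on version B (the rewrite author's own statement) =====
-- stated objective: alternative
-- what changed: B replaces A's single nested stateful loop with a two-phase decomposition: one pass flattens paragraphs into (emit_string, threshold_cost) pieces (word-packing over-length paragraphs), then one uniform greedy pass packs those pieces into messages.
import Mathlib
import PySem

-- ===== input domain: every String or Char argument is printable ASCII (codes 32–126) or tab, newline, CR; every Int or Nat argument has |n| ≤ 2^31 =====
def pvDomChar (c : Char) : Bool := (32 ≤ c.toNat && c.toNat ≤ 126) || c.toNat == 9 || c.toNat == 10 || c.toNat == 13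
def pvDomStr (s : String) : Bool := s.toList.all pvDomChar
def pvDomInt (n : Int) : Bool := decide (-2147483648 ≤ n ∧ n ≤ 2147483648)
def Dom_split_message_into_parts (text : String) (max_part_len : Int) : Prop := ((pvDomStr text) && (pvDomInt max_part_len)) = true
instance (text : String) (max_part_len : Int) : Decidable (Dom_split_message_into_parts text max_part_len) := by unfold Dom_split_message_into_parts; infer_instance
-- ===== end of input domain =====

-- B restructures A's nested stateful loop into two phases (flatten to (piece, cost) pairs, then greedy packing); same cost, proved equal on all inputs.

-- ===== PORT A =====
-- A's flush of current_paragraph into (messages, current_message) (the duplicated else/trailing block)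
def aFlush (maxLen : Int) (mc : List (List Char) × List Char) (cp : List Char) : List (List Char) × List Char :=
  if (mc.2.length : Int) + cp.length ≤ maxLen then (mc.1, mc.2 ++ (cp ++ ['\n']))
  else (mc.1 ++ [mc.2], cp ++ ['\n'])

-- A's inner word loop body; state = ((messages, current_message), current_paragraph)
def aWordStep (maxLen : Int) (s : (List (List Char) × List Char) × List Char) (word : List Char) :
    (List (List Char) × List Char) × List Char :=
  if (s.2.length : Int) + word.length + 1 ≤ maxLen then (s.1, s.2 ++ (word ++ [' ']))
  else (aFlush maxLen s.1 s.2, word ++ [' '])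

-- A's outer paragraph loop body
def aParStep (maxLen : Int) (st : List (List Char) × List Char) (p : List Char) :
    List (List Char) × List Char :=
  if (p.length : Int) > maxLen then
    let s := (PySem.Chars.splitOn p [' ']).foldl (aWordStep maxLen) (st, [])
    if s.2 ≠ [] then aFlush maxLen s.1 s.2 else s.1
  else
    if (st.2.length : Int) + p.length + 1 ≤ maxLen then (st.1, st.2 ++ (p ++ ['\n']))
    else (st.1 ++ [st.2], p ++ ['\n'])

def split_message_into_parts (text : String) (max_part_len : Int) : List String :=
  let st := (PySem.Chars.splitOn text.toList ['\n']).foldl (aParStep max_part_len) ([], [])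
  (if st.2 ≠ [] then st.1 ++ [st.2] else st.1).map String.ofList

-- ===== PORT B =====
-- B phase 1, inner word loop body; state = (pieces, seg)
def bSegStep (maxLen : Int) (s : List (List Char × Int) × List Char) (word : List Char) :
    List (List Char × Int) × List Char :=
  if (s.2.length : Int) + word.length + 1 ≤ maxLen then (s.1, s.2 ++ (word ++ [' ']))
  else (s.1 ++ [(s.2 ++ ['\n'], (s.2.length : Int))], word ++ [' '])

-- B phase 1, per-paragraph body: append this paragraph's pieces
def bPieceStep (maxLen : Int) (ps : List (List Char × Int)) (p : List Char) :
    List (List Char × Int) :=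
  if (p.length : Int) > maxLen then
    let s := (PySem.Chars.splitOn p [' ']).foldl (bSegStep maxLen) (ps, [])
    if s.2 ≠ [] then s.1 ++ [(s.2 ++ ['\n'], (s.2.length : Int))] else s.1
  else ps ++ [(p ++ ['\n'], (p.length : Int) + 1)]

-- B phase 2, greedy packing body; state = (messages, current)
def bPackStep (maxLen : Int) (st : List (List Char) × List Char) (pc : List Char × Int) :
    List (List Char) × List Char :=
  if (st.2.length : Int) + pc.2 ≤ maxLen then (st.1, st.2 ++ pc.1)
  else (st.1 ++ [st.2], pc.1)

def split_message_into_parts_alt (text : String) (max_part_len : Int) : List String :=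
  let pieces := (PySem.Chars.splitOn text.toList ['\n']).foldl (bPieceStep max_part_len) []
  let st := pieces.foldl (bPackStep max_part_len) ([], [])
  (if st.2 ≠ [] then st.1 ++ [st.2] else st.1).map String.ofList

-- ===== PRECONDITION & SPEC =====
def Spec_split_message_into_parts (text : String) (max_part_len : Int) (out : List String) : Prop := out = split_message_into_parts_alt text max_part_len
instance (text : String) (max_part_len : Int) (out : List String) : Decidable (Spec_split_message_into_parts text max_part_len out) := by unfold Spec_split_message_into_parts; infer_instance

-- ===== CLAIM (what is proved, stated in full; the proofs are below) =====
def Claim_equal_split_message_into_parts : Prop := ∀ (text : String) (max_part_len : Int), Dom_split_message_into_parts text max_part_len → Spec_split_message_into_parts text max_part_len (split_message_into_parts text max_part_len)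

-- ===== LEMMAS AND PROOFS =====

-- B's inner fold only appends to the piece accumulator
theorem bSegStep_acc (maxLen : Int) (ws : List (List Char)) :
    ∀ (acc : List (List Char × Int)) (seg : List Char),
      ws.foldl (bSegStep maxLen) (acc, seg)
        = (acc ++ (ws.foldl (bSegStep maxLen) ([], seg)).1,
           (ws.foldl (bSegStep maxLen) ([], seg)).2) := by
  induction ws with
  | nil => intro acc seg; simp
  | cons w ws ih =>
    intro acc seg
    simp only [List.foldl_cons, bSegStep, List.nil_append]
    by_cases h : (seg.length : Int) + w.length + 1 ≤ maxLen
    · simp only [if_pos h]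
      exact ih acc (seg ++ (w ++ [' ']))
    · simp only [if_neg h]
      rw [ih (acc ++ [(seg ++ ['\n'], (seg.length : Int))]) (w ++ [' ']),
          ih [(seg ++ ['\n'], (seg.length : Int))] (w ++ [' '])]
      simp

-- per-paragraph pieces are appended
theorem bPieceStep_acc (maxLen : Int) (ps : List (List Char × Int)) (p : List Char) :
    bPieceStep maxLen ps p = ps ++ bPieceStep maxLen [] p := by
  unfold bPieceStep
  by_cases h : (p.length : Int) > maxLen
  · simp only [h, if_pos]
    rw [bSegStep_acc]
    by_cases h2 : ((PySem.Chars.splitOn p [' ']).foldl (bSegStep maxLen) ([], [])).2 = []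
    · simp [h2]
    · simp [h2]
  · simp [h]

-- flushing a word-packed segment piece is A's flush
theorem bPackStep_piece (maxLen : Int) (st : List (List Char) × List Char) (seg : List Char) :
    bPackStep maxLen st (seg ++ ['\n'], (seg.length : Int)) = aFlush maxLen st seg := by
  simp [bPackStep, aFlush]

-- main per-paragraph lemma: A's inner loop + trailing flush = packing B's pieces for this paragraph
theorem inner_eq (maxLen : Int) (ws : List (List Char)) :
    ∀ (st : List (List Char) × List Char) (seg : List Char),
      (let s := ws.foldl (aWordStep maxLen) (st, seg);
       if s.2 ≠ [] then aFlush maxLen s.1 s.2 else s.1)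
      = (let t := ws.foldl (bSegStep maxLen) ([], seg);
         if t.2 ≠ [] then t.1 ++ [(t.2 ++ ['\n'], (t.2.length : Int))] else t.1).foldl
          (bPackStep maxLen) st := by
  induction ws with
  | nil =>
    intro st seg
    by_cases h : seg = [] <;> simp [h, bPackStep_piece]
  | cons w ws ih =>
    intro st seg
    simp only [List.foldl_cons, aWordStep, bSegStep, List.nil_append]
    by_cases h : (seg.length : Int) + w.length + 1 ≤ maxLen
    · simp only [if_pos h]
      exact ih st (seg ++ (w ++ [' ']))
    · simp only [if_neg h]
      rw [ih (aFlush maxLen st seg) (w ++ [' ']),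
          bSegStep_acc maxLen ws [(seg ++ ['\n'], (seg.length : Int))] (w ++ [' '])]
      by_cases h3 : (ws.foldl (bSegStep maxLen) ([], w ++ [' '])).2 = [] <;>
        simp [h3, List.foldl_append, bPackStep_piece]

-- A's paragraph step packs exactly B's pieces for that paragraph
theorem parStep_eq (maxLen : Int) (st : List (List Char) × List Char) (p : List Char) :
    aParStep maxLen st p = (bPieceStep maxLen [] p).foldl (bPackStep maxLen) st := by
  unfold aParStep bPieceStep
  by_cases h : (p.length : Int) > maxLen
  · simp only [h, if_pos]
    exact inner_eq maxLen (PySem.Chars.splitOn p [' ']) st []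
  · simp only [h, if_false, List.nil_append, List.foldl_cons, List.foldl_nil, bPackStep]
    by_cases h2 : (st.2.length : Int) + p.length + 1 ≤ maxLen
    · rw [if_pos h2, if_pos (by omega)]
    · rw [if_neg h2, if_neg (by omega)]

-- the piece list of later paragraphs is appended after the accumulator
theorem bPieceStep_fold_acc (maxLen : Int) (ps : List (List Char)) :
    ∀ (acc : List (List Char × Int)),
      ps.foldl (bPieceStep maxLen) acc = acc ++ ps.foldl (bPieceStep maxLen) [] := by
  induction ps with
  | nil => intro acc; simp
  | cons p ps ih =>
    intro acc
    simp only [List.foldl_cons]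
    rw [bPieceStep_acc, ih, ih (bPieceStep maxLen [] p), List.append_assoc]

-- the whole outer loop
theorem outer_eq (maxLen : Int) (ps : List (List Char)) :
    ∀ (st : List (List Char) × List Char),
      ps.foldl (aParStep maxLen) st
        = (ps.foldl (bPieceStep maxLen) []).foldl (bPackStep maxLen) st := by
  induction ps with
  | nil => intro st; simp
  | cons p ps ih =>
    intro st
    simp only [List.foldl_cons]
    rw [ih, parStep_eq, ← List.foldl_append, bPieceStep_fold_acc maxLen ps (bPieceStep maxLen [] p)]

-- ===== VERDICT (by name: the statement is the Claim_ definition above) =====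
theorem split_message_into_parts_spec : Claim_equal_split_message_into_parts := by
  intro text maxLen _
  unfold Spec_split_message_into_parts split_message_into_parts split_message_into_parts_alt
  simp only []
  rw [outer_eq]
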